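-- pv_equiv track=rewrite | github.com/magnusdv/filtus | filtus/InputDialog.py | _guessVCF
-- ===== SOURCE A (Python) =====
-- def _guessVCF(headers, firstvar):
--     '''Returns (vcf [T/F], infoCol, formatCol) Requires "format" in column name AND matching numbers of colons in all remaining cols'''
--     n = len(headers)
--     lowheads = [h.lower() for h in headers]
--     kolon = [x.count(':') for x in firstvar]
--     for i in range(n-1, 1, -1): # shorter to go backwards
--         if not 'format' in lowheads[i]: continue
--         k = kolon[i]
--         if k==0 and not firstvar[i]=='GT': continue
--         if all(0 <= kolon[j] <= k or firstvar[j]=='./.' for j in range(i+1, n)):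
--             infoCol = headers[i-1] if 'info' in lowheads[i-1] else ''
--             formatCol = headers[i]
--             return (True, infoCol, formatCol)
--     return (False,'','')
-- ===== SOURCE B (Python) =====
-- def _guessVCF(headers, firstvar):
--     '''Returns (vcf [T/F], infoCol, formatCol) Requires "format" in column name AND matching numbers of colons in all remaining cols'''
--     n = len(headers)
--     lowheads = [h.lower() for h in headers]
--     if not any('format' in h for h in lowheads[2:]):
--         return (False, '', '')
--     kolon = [x.count(':') for x in firstvar]
--     # staged passes: suffs[i-2] = max colon count over columns [i, n), './.' ignored (suffs ends with -1)
--     suffs = [-1]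
--     for i in range(n - 1, 1, -1):
--         s = suffs[0]
--         suffs.insert(0, s if firstvar[i] == './.' else max(s, kolon[i]))
--     cands = [i for i in range(2, n)
--              if 'format' in lowheads[i]
--              and (kolon[i] > 0 or firstvar[i] == 'GT')
--              and suffs[i - 1] <= kolon[i]]
--     if not cands:
--         return (False, '', '')
--     i = cands[-1]
--     info = headers[i - 1] if 'info' in lowheads[i - 1] else ''
--     return (True, info, headers[i])
-- ===== Notes on version B (the rewrite author's own statement) =====
-- stated objective: alternative
-- what changed: Replaces A's backward loop with a nested all(...) scan per 'format' candidate by staged passes: one pass builds the suffix-maximum list of colon counts ('./.' columns ignored), a forward comprehension filters the qualifying candidate columns and the last one is taken, plus an early exit when no header from column 2 on contains 'format'; timing was borderline, so no speed is claimed.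
-- outside the precondition, e.g. on _guessVCF(['a', 'b', 'FORMAT', 'e'], ['', '', '']): A returns (False, '', ''), B raises IndexError
import Mathlib
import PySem

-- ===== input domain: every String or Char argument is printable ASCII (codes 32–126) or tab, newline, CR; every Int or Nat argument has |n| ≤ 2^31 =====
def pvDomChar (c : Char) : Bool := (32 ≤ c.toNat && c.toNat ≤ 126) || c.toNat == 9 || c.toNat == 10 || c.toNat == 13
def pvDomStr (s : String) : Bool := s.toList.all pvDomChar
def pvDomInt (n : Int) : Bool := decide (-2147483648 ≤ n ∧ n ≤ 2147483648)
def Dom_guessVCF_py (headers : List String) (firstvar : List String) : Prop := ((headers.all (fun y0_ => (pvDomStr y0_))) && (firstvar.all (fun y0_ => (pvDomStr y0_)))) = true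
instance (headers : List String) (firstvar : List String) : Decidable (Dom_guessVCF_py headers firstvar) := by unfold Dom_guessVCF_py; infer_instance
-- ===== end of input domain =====

-- B replaces A's backward loop with a nested all(...) scan per 'format' candidate by staged passes:
-- one pass building the suffix-maximum list of colon counts ('./.' ignored), then a forward filter
-- of qualifying candidate columns, taking the last; plus an early exit when no header has 'format'.

-- ===== PORT A =====
-- the backwards 'for i in range(n-1, 1, -1)' loop of A, with early return
def guessVCF_pyLoop (headers lowheads firstvar : List String) (kolon : List Int) (n : Int) :
    List Int → Bool × String × String
  | [] => (false, "", "")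
  | i :: rest =>
    if ¬ (PySem.Str.isIn "format" (PySem.List.pyGetD lowheads i "") = true) then
      guessVCF_pyLoop headers lowheads firstvar kolon n rest
    else
      let k := PySem.List.pyGetD kolon i 0
      if k = 0 ∧ ¬ (PySem.List.pyGetD firstvar i "" = "GT") then
        guessVCF_pyLoop headers lowheads firstvar kolon n rest
      else if (PySem.List.pyRange (i+1) n 1).all (fun j =>
            decide ((0 ≤ PySem.List.pyGetD kolon j 0 ∧ PySem.List.pyGetD kolon j 0 ≤ k)
                     ∨ PySem.List.pyGetD firstvar j "" = "./.")) then
        (true,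
         if PySem.Str.isIn "info" (PySem.List.pyGetD lowheads (i-1) "") then
           PySem.List.pyGetD headers (i-1) "" else "",
         PySem.List.pyGetD headers i "")
      else
        guessVCF_pyLoop headers lowheads firstvar kolon n rest

def guessVCF_py (headers : List String) (firstvar : List String) : Bool × String × String :=
  let n : Int := headers.length
  let lowheads := headers.map PySem.Str.lower
  let kolon := firstvar.map (fun x => (PySem.Str.count x ":" : Int))
  guessVCF_pyLoop headers lowheads firstvar kolon n (PySem.List.pyRange (n-1) 1 (-1))

-- ===== PORT B =====
-- staged passes: build the suffix-max list 'suffs' by one fold (prepending, as Source B inserts at 0),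
-- filter the qualifying candidate columns in increasing order, take the last one.
def guessVCF_py_alt (headers : List String) (firstvar : List String) : Bool × String × String :=
  let n : Int := headers.length
  let lowheads := headers.map PySem.Str.lower
  if ¬ ((PySem.List.slice lowheads (some 2) none).any (fun h => PySem.Str.isIn "format" h)) then
    (false, "", "")
  else
    let kolon := firstvar.map (fun x => (PySem.Str.count x ":" : Int))
    let suffs := (PySem.List.pyRange (n-1) 1 (-1)).foldl
      (fun suffs i =>
        let s := PySem.List.pyGetD suffs 0 0
        (if PySem.List.pyGetD firstvar i "" = "./." then s
         else max s (PySem.List.pyGetD kolon i 0)) :: suffs)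
      [-1]
    let cands := (PySem.List.pyRange 2 n 1).filter (fun i =>
      PySem.Str.isIn "format" (PySem.List.pyGetD lowheads i "")
      && decide (0 < PySem.List.pyGetD kolon i 0 ∨ PySem.List.pyGetD firstvar i "" = "GT")
      && decide (PySem.List.pyGetD suffs (i-1) 0 ≤ PySem.List.pyGetD kolon i 0))
    match cands.getLast? with
    | none => (false, "", "")
    | some i =>
        (true,
         if PySem.Str.isIn "info" (PySem.List.pyGetD lowheads (i-1) "") then
           PySem.List.pyGetD headers (i-1) "" else "",
         PySem.List.pyGetD headers i "")

-- ===== PRECONDITION & SPEC =====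
-- Pre_ excludes inputs where firstvar is shorter than headers while some header from column 2 on
-- contains 'format': there A's lazy indexing of firstvar raises IndexError on some of these inputs
-- and returns on others depending on short-circuiting, while B's suffix pass raises IndexError.
def Pre_guessVCF_py (headers : List String) (firstvar : List String) : Prop :=
  headers.length ≤ firstvar.length ∨
    ∀ h ∈ headers.drop 2, PySem.Str.isIn "format" (PySem.Str.lower h) = false
instance (headers : List String) (firstvar : List String) : Decidable (Pre_guessVCF_py headers firstvar) := by
  unfold Pre_guessVCF_py; infer_instance

def pvWitness_guessVCF_py : List String × List String :=
  (["#CHROM", "POS", "FORMAT"], ["1", "2", "0/1:3"])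

def Spec_guessVCF_py (headers : List String) (firstvar : List String) (out : Bool × String × String) : Prop := out = guessVCF_py_alt headers firstvar
instance (headers : List String) (firstvar : List String) (out : Bool × String × String) : Decidable (Spec_guessVCF_py headers firstvar out) := by unfold Spec_guessVCF_py; infer_instance

-- ===== CLAIM (what is proved, stated in full; the proofs are below) =====
def Claim_equal_guessVCF_py : Prop := ∀ (headers : List String) (firstvar : List String), Dom_guessVCF_py headers firstvar → Pre_guessVCF_py headers firstvar → Spec_guessVCF_py headers firstvar (guessVCF_py headers firstvar)

-- ===== LEMMAS AND PROOFS =====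

-- the step updating the running suffix maximum at column j ('./.' ignored)
def pvStep (firstvar : List String) (kolon : List Int) (acc : Int) (j : Int) : Int :=
  if ¬ (PySem.List.pyGetD firstvar j "" = "./.") then max acc (PySem.List.pyGetD kolon j 0) else acc

-- suffix maximum over indices (i, n)
def pvM (firstvar : List String) (kolon : List Int) (n i : Int) : Int :=
  (PySem.List.pyRange (i+1) n 1).foldl (pvStep firstvar kolon) (-1)

-- the abstract shape of Source B's suffs list: [pvM i, pvM (i+1), …, pvM (i+m-1), -1]
def pvSuffList (firstvar : List String) (kolon : List Int) (n : Int) : Nat → Int → List Int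
  | 0, _ => [-1]
  | m+1, i => pvM firstvar kolon n i :: pvSuffList firstvar kolon n m (i+1)

lemma pvStep_comm (fv : List String) (ko : List Int) (a x y : Int) :
    pvStep fv ko (pvStep fv ko a x) y = pvStep fv ko (pvStep fv ko a y) x := by
  unfold pvStep; split_ifs <;> simp [max_left_comm, max_comm]

lemma foldl_pvStep_out (fv : List String) (ko : List Int) (l : List Int) (a x : Int) :
    l.foldl (pvStep fv ko) (pvStep fv ko a x) = pvStep fv ko (l.foldl (pvStep fv ko) a) x := by
  induction l generalizing a with
  | nil => rfl
  | cons y t ih => simp only [List.foldl_cons, pvStep_comm fv ko a x y, ih]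

lemma pvM_pred (fv : List String) (ko : List Int) (n i : Int) (hi : i < n) :
    pvM fv ko n (i - 1) = pvStep fv ko (pvM fv ko n i) i := by
  unfold pvM
  rw [show i - 1 + 1 = i by ring, PySem.List.pyRange_one_cons hi, List.foldl_cons,
      foldl_pvStep_out]

lemma pvM_top (fv : List String) (ko : List Int) (n : Int) :
    pvM fv ko n (n - 1) = -1 := by
  unfold pvM
  rw [show n - 1 + 1 = n by ring, PySem.List.pyRange_one_eq_nil le_rfl]
  rfl

lemma foldl_pvStep_le (fv : List String) (ko : List Int) (l : List Int) (a k : Int) :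
    l.foldl (pvStep fv ko) a ≤ k ↔
      a ≤ k ∧ ∀ j ∈ l, ¬ (PySem.List.pyGetD fv j "" = "./.") → PySem.List.pyGetD ko j 0 ≤ k := by
  induction l generalizing a with
  | nil => simp
  | cons x t ih =>
    simp only [List.foldl_cons, ih, List.mem_cons]
    constructor
    · rintro ⟨h1, h2⟩
      unfold pvStep at h1
      split_ifs at h1 with hc
      · exact ⟨h1, fun j hj hcj => by
          rcases hj with rfl | hj
          · exact absurd hc hcj
          · exact h2 j hj hcj⟩
      · exact ⟨le_of_max_le_left h1, fun j hj hcj => by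
          rcases hj with rfl | hj
          · exact le_of_max_le_right h1
          · exact h2 j hj hcj⟩
    · rintro ⟨h1, h2⟩
      refine ⟨?_, fun j hj hcj => h2 j (Or.inr hj) hcj⟩
      unfold pvStep
      split_ifs with hc
      · exact h1
      · exact max_le h1 (h2 x (Or.inl rfl) hc)

-- entries of kolon are nonnegative, read anywhere in range
lemma kolon_nonneg (firstvar : List String) (j : Int) (h0 : 0 ≤ j)
    (hj : j < (firstvar.length : Int)) :
    0 ≤ PySem.List.pyGetD (firstvar.map (fun x => (PySem.Str.count x ":" : Int))) j 0 := by
  rw [PySem.List.pyGetD_eq_getElem _ 0 h0 (by simpa using hj)]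
  simp

-- A's all(...) condition equals 'suffix max ≤ k'
lemma all_iff_pvM_le (firstvar : List String) (n i k : Int)
    (hlen : n ≤ (firstvar.length : Int)) (hi : 0 ≤ i) (hk : 0 ≤ k) :
    ((PySem.List.pyRange (i+1) n 1).all (fun j =>
        decide ((0 ≤ PySem.List.pyGetD (firstvar.map (fun x => (PySem.Str.count x ":" : Int))) j 0
                  ∧ PySem.List.pyGetD (firstvar.map (fun x => (PySem.Str.count x ":" : Int))) j 0 ≤ k)
                 ∨ PySem.List.pyGetD firstvar j "" = "./.")) = true)
      ↔ pvM firstvar (firstvar.map (fun x => (PySem.Str.count x ":" : Int))) n i ≤ k := by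
  set ko := firstvar.map (fun x => (PySem.Str.count x ":" : Int)) with hko
  rw [pvM, foldl_pvStep_le]
  simp only [List.all_eq_true, decide_eq_true_eq]
  constructor
  · intro h
    refine ⟨by omega, fun j hj hcj => ?_⟩
    rcases h j hj with ⟨_, h2⟩ | h2
    · exact h2
    · exact absurd h2 hcj
  · rintro ⟨-, h⟩ j hj
    rw [PySem.List.mem_pyRange_one] at hj
    by_cases hc : PySem.List.pyGetD firstvar j "" = "./."
    · exact Or.inr hc
    · exact Or.inl ⟨kolon_nonneg firstvar j (by omega) (by omega), h j (by rw [PySem.List.mem_pyRange_one]; omega) hc⟩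

-- if no visited index has a 'format' header, A's loop falls through
lemma guessVCF_pyLoop_no_format (headers lowheads firstvar : List String) (kolon : List Int)
    (n : Int) (l : List Int)
    (h : ∀ i ∈ l, PySem.Str.isIn "format" (PySem.List.pyGetD lowheads i "") = false) :
    guessVCF_pyLoop headers lowheads firstvar kolon n l = (false, "", "") := by
  induction l with
  | nil => rfl
  | cons i t ih =>
    rw [guessVCF_pyLoop]
    rw [if_pos (by simp only [h i (List.mem_cons_self ..)]; simp)]
    exact ih (fun j hj => h j (List.mem_cons_of_mem _ hj))

-- the head of a pvSuffList is the suffix maximum at its start index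
lemma pvSuffList_head (fv : List String) (ko : List Int) (n : Int) (i : Int)
    (h : (n - 1 - i).toNat = 0 → i = n - 1) :
    PySem.List.pyGetD (pvSuffList fv ko n (n - 1 - i).toNat i) 0 0 = pvM fv ko n i := by
  cases hm : (n - 1 - i).toNat with
  | zero =>
    rw [h hm] at *
    simp [pvSuffList, PySem.List.pyGetD_zero_cons, pvM_top]
  | succ m =>
    simp [pvSuffList, PySem.List.pyGetD_zero_cons]

-- Source B's suffix-building fold produces exactly a pvSuffList
lemma suff_fold (fv : List String) (ko : List Int) (n : Int) (k : Nat) (b : Int)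
    (hb : 1 ≤ b) (hk : b + (k : Int) ≤ n - 1) :
    (PySem.List.pyRange (b + (k : Int)) b (-1)).foldl
      (fun suffs i =>
        (if PySem.List.pyGetD fv i "" = "./." then PySem.List.pyGetD suffs 0 0
         else max (PySem.List.pyGetD suffs 0 0) (PySem.List.pyGetD ko i 0)) :: suffs)
      (pvSuffList fv ko n (n - 1 - (b + (k : Int))).toNat (b + (k : Int)))
    = pvSuffList fv ko n (n - 1 - b).toNat b := by
  induction k generalizing b with
  | zero =>
    rw [show b + ((0 : Nat) : Int) = b by push_cast; ring,
        PySem.List.pyRange_neg_one_eq_nil le_rfl]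
    rfl
  | succ m ih =>
    set a : Int := b + ((m + 1 : Nat) : Int) with ha
    have ha' : a = (b + 1) + (m : Int) := by rw [ha]; push_cast; ring
    rw [PySem.List.pyRange_neg_one_cons (by omega : b < a), List.foldl_cons]
    have hhead : PySem.List.pyGetD (pvSuffList fv ko n (n - 1 - a).toNat a) 0 0
        = pvM fv ko n a := pvSuffList_head fv ko n a (by omega)
    have hstep : (if PySem.List.pyGetD fv a "" = "./."
          then PySem.List.pyGetD (pvSuffList fv ko n (n - 1 - a).toNat a) 0 0
          else max (PySem.List.pyGetD (pvSuffList fv ko n (n - 1 - a).toNat a) 0 0)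
                   (PySem.List.pyGetD ko a 0)) :: pvSuffList fv ko n (n - 1 - a).toNat a
        = pvSuffList fv ko n (n - 1 - (a - 1)).toNat (a - 1) := by
      have h1 : (n - 1 - (a - 1)).toNat = (n - 1 - a).toNat + 1 := by omega
      rw [h1, pvSuffList, show a - 1 + 1 = a by ring, hhead]
      have h2 : pvM fv ko n (a - 1) = pvStep fv ko (pvM fv ko n a) a :=
        pvM_pred fv ko n a (by omega)
      rw [h2]; unfold pvStep
      by_cases hc : PySem.List.pyGetD fv a "" = "./." <;> simp [hc]
    rw [hstep]
    have hab : a - 1 = b + (m : Int) := by omega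
    rw [hab] at *
    exact ih b hb (by omega)

-- reading the pvSuffList at a valid index
lemma pvSuffList_getD (fv : List String) (ko : List Int) (n : Int) (m t : Nat) (i : Int)
    (ht : t ≤ m) :
    PySem.List.pyGetD (pvSuffList fv ko n m i) (t : Int) 0
      = if t = m then -1 else pvM fv ko n (i + t) := by
  induction m generalizing t i with
  | zero =>
    interval_cases t
    simp [pvSuffList, PySem.List.pyGetD_zero_cons]
  | succ m ih =>
    cases t with
    | zero =>
      simp [pvSuffList, PySem.List.pyGetD_zero_cons]
    | succ s =>
      rw [pvSuffList]
      rw [PySem.List.pyGetD_natCast]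
      have h1 : (pvM fv ko n i :: pvSuffList fv ko n m (i+1)).getD (s+1) 0
          = (pvSuffList fv ko n m (i+1)).getD s 0 := rfl
      rw [h1, ← PySem.List.pyGetD_natCast, ih s (i+1) (by omega)]
      have hcast : i + 1 + (s : Int) = i + ((s + 1 : Nat) : Int) := by push_cast; ring
      rw [hcast]
      by_cases he : s = m
      · simp [he]
      · rw [if_neg he, if_neg (by omega)]

-- the lookup Source B performs: suffs[i-1] is the suffix maximum over (i, n)
lemma suffs_lookup (fv : List String) (ko : List Int) (n i : Int)
    (h2 : 2 ≤ i) (hin : i < n) :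
    PySem.List.pyGetD (pvSuffList fv ko n (n - 2).toNat 1) (i - 1) 0 = pvM fv ko n i := by
  have hti : ((i - 1).toNat : Int) = i - 1 := by omega
  rw [← hti, pvSuffList_getD fv ko n _ _ 1 (by omega)]
  by_cases he : (i - 1).toNat = (n - 2).toNat
  · rw [if_pos he]
    have : i = n - 1 := by omega
    rw [this] at *
    exact (pvM_top fv ko n).symm
  · rw [if_neg he, show (1 : Int) + ((i-1).toNat : Int) = i by omega]

-- main induction: A's backward loop from index i returns exactly the last qualifying
-- candidate of B's forward filter over [2, i]
lemma loop_eq_filter (headers firstvar : List String)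
    (hlen : (headers.length : Int) ≤ (firstvar.length : Int)) (i : Nat)
    (hi : (i : Int) ≤ (headers.length : Int) - 1) :
    guessVCF_pyLoop headers (headers.map PySem.Str.lower) firstvar
        (firstvar.map (fun x => (PySem.Str.count x ":" : Int))) (headers.length : Int)
        (PySem.List.pyRange (i : Int) 1 (-1))
      = (match ((PySem.List.pyRange 2 ((i : Int) + 1) 1).filter (fun j =>
            PySem.Str.isIn "format" (PySem.List.pyGetD (headers.map PySem.Str.lower) j "")
            && decide (0 < PySem.List.pyGetD (firstvar.map (fun x => (PySem.Str.count x ":" : Int))) j 0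
                       ∨ PySem.List.pyGetD firstvar j "" = "GT")
            && decide (PySem.List.pyGetD
                  (pvSuffList firstvar (firstvar.map (fun x => (PySem.Str.count x ":" : Int)))
                    (headers.length : Int) ((headers.length : Int) - 2).toNat 1) (j-1) 0
                  ≤ PySem.List.pyGetD (firstvar.map (fun x => (PySem.Str.count x ":" : Int))) j 0))).getLast? with
        | none => (false, "", "")
        | some j =>
            (true,
             if PySem.Str.isIn "info" (PySem.List.pyGetD (headers.map PySem.Str.lower) (j-1) "") then
               PySem.List.pyGetD headers (j-1) "" else "",
             PySem.List.pyGetD headers j "")) := by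
  set lh := headers.map PySem.Str.lower with hlh
  set ko := firstvar.map (fun x => (PySem.Str.count x ":" : Int)) with hko
  set n : Int := (headers.length : Int) with hn
  set P : Int → Bool := fun j =>
    PySem.Str.isIn "format" (PySem.List.pyGetD lh j "")
    && decide (0 < PySem.List.pyGetD ko j 0 ∨ PySem.List.pyGetD firstvar j "" = "GT")
    && decide (PySem.List.pyGetD (pvSuffList firstvar ko n (n-2).toNat 1) (j-1) 0
               ≤ PySem.List.pyGetD ko j 0) with hPdef
  induction i with
  | zero =>
    rw [PySem.List.pyRange_neg_one_eq_nil (by norm_num),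
        PySem.List.pyRange_one_eq_nil (by norm_num)]
    rfl
  | succ m ih =>
    by_cases hm0 : m = 0
    · subst hm0
      rw [PySem.List.pyRange_neg_one_eq_nil (by norm_num),
          PySem.List.pyRange_one_eq_nil (by norm_num)]
      rfl
    · have hc1 : ((m+1 : Nat) : Int) = (m : Int) + 1 := by push_cast; ring
      rw [hc1, PySem.List.pyRange_neg_one_cons (by omega : (1:Int) < (m : Int) + 1),
          show (m : Int) + 1 - 1 = (m : Int) by ring]
      rw [PySem.List.pyRange_one_succ_right (by omega : (2:Int) ≤ (m : Int) + 1),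
          List.filter_append]
      have hk0 : 0 ≤ PySem.List.pyGetD ko ((m : Int) + 1) 0 := by
        rw [hko]; exact kolon_nonneg firstvar _ (by omega) (by omega)
      have hlook : PySem.List.pyGetD (pvSuffList firstvar ko n (n-2).toNat 1) ((m : Int) + 1 - 1) 0
          = pvM firstvar ko n ((m : Int) + 1) :=
        suffs_lookup firstvar ko n ((m : Int) + 1) (by omega) (by omega)
      have hcond := all_iff_pvM_le firstvar n ((m : Int) + 1)
        (PySem.List.pyGetD ko ((m : Int) + 1) 0) (by omega) (by omega) hk0
      rw [← hko] at hcond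
      rw [guessVCF_pyLoop]
      by_cases hf : PySem.Str.isIn "format" (PySem.List.pyGetD lh ((m : Int) + 1) "") = true
      · rw [if_neg (not_not_intro hf)]
        by_cases hskip : PySem.List.pyGetD ko ((m : Int) + 1) 0 = 0
            ∧ ¬ (PySem.List.pyGetD firstvar ((m : Int) + 1) "" = "GT")
        · -- candidate skipped by both: k = 0 and not GT
          rw [if_pos hskip]
          have hP : (PySem.Str.isIn "format" (PySem.List.pyGetD lh ((m : Int) + 1) "")
              && decide (0 < PySem.List.pyGetD ko ((m : Int) + 1) 0
                         ∨ PySem.List.pyGetD firstvar ((m : Int) + 1) "" = "GT")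
              && decide (PySem.List.pyGetD (pvSuffList firstvar ko n (n-2).toNat 1) ((m : Int) + 1 - 1) 0
                         ≤ PySem.List.pyGetD ko ((m : Int) + 1) 0)) = false := by
            simp only [Bool.and_eq_false_iff, decide_eq_false_iff_not]
            left; right
            rintro (h | h)
            · omega
            · exact hskip.2 h
          have hfilter : List.filter P [(m : Int) + 1] = ([] : List Int) := by
            simp only [List.filter_singleton, hPdef]; rw [hP]; rfl
          rw [hfilter, List.append_nil]
          exact ih (by omega)
        · have hgt : 0 < PySem.List.pyGetD ko ((m : Int) + 1) 0
              ∨ PySem.List.pyGetD firstvar ((m : Int) + 1) "" = "GT" := by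
            rcases not_and_or.mp hskip with h0 | hg
            · exact Or.inl (by omega)
            · exact Or.inr (not_not.mp hg)
          rw [if_neg hskip]
          by_cases hall : pvM firstvar ko n ((m : Int) + 1) ≤ PySem.List.pyGetD ko ((m : Int) + 1) 0
          · -- both take this candidate
            rw [if_pos (hcond.mpr hall)]
            have hP : (PySem.Str.isIn "format" (PySem.List.pyGetD lh ((m : Int) + 1) "")
                && decide (0 < PySem.List.pyGetD ko ((m : Int) + 1) 0
                           ∨ PySem.List.pyGetD firstvar ((m : Int) + 1) "" = "GT")
                && decide (PySem.List.pyGetD (pvSuffList firstvar ko n (n-2).toNat 1) ((m : Int) + 1 - 1) 0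
                           ≤ PySem.List.pyGetD ko ((m : Int) + 1) 0)) = true := by
              rw [hlook]
              simp only [Bool.and_eq_true, decide_eq_true_eq]
              exact ⟨⟨hf, hgt⟩, hall⟩
            have hfilter : List.filter P [(m : Int) + 1] = [(m : Int) + 1] := by
              simp only [List.filter_singleton, hPdef]; rw [hP]; rfl
            rw [hfilter]
            simp only [List.getLast?_concat]
          · -- both reject this candidate
            rw [if_neg (fun hc => hall (hcond.mp hc))]
            have hP : (PySem.Str.isIn "format" (PySem.List.pyGetD lh ((m : Int) + 1) "")
                && decide (0 < PySem.List.pyGetD ko ((m : Int) + 1) 0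
                           ∨ PySem.List.pyGetD firstvar ((m : Int) + 1) "" = "GT")
                && decide (PySem.List.pyGetD (pvSuffList firstvar ko n (n-2).toNat 1) ((m : Int) + 1 - 1) 0
                           ≤ PySem.List.pyGetD ko ((m : Int) + 1) 0)) = false := by
              rw [hlook]
              simp only [Bool.and_eq_false_iff, decide_eq_false_iff_not]
              right; exact hall
            have hfilter : List.filter P [(m : Int) + 1] = ([] : List Int) := by
              simp only [List.filter_singleton, hPdef]; rw [hP]; rfl
            rw [hfilter, List.append_nil]
            exact ih (by omega)
      · -- no 'format' in this header
        rw [if_pos hf]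
        have hP : (PySem.Str.isIn "format" (PySem.List.pyGetD lh ((m : Int) + 1) "")
            && decide (0 < PySem.List.pyGetD ko ((m : Int) + 1) 0
                       ∨ PySem.List.pyGetD firstvar ((m : Int) + 1) "" = "GT")
            && decide (PySem.List.pyGetD (pvSuffList firstvar ko n (n-2).toNat 1) ((m : Int) + 1 - 1) 0
                       ≤ PySem.List.pyGetD ko ((m : Int) + 1) 0)) = false := by
          simp only [Bool.and_eq_false_iff]
          left; left
          exact (Bool.not_eq_true _).mp hf
        have hfilter : List.filter P [(m : Int) + 1] = ([] : List Int) := by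
          simp only [List.filter_singleton, hPdef]; rw [hP]; rfl
        rw [hfilter, List.append_nil]
        exact ih (by omega)

-- membership of an indexed lowered header in the dropped slice
lemma pyGetD_mem_drop_two (lh : List String) (i : Int) (h2 : 2 ≤ i) (hlt : i < (lh.length : Int)) :
    PySem.List.pyGetD lh i "" ∈ lh.drop 2 := by
  rw [PySem.List.pyGetD_eq_getElem _ "" (by omega) hlt]
  have h : lh[i.toNat] = (lh.drop 2)[i.toNat - 2]'(by simp; omega) := by
    rw [List.getElem_drop]
    congr 1
    omega
  rw [h]
  exact List.getElem_mem _

-- ===== VERDICT (by name: the statement is the Claim_ definition above) =====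
theorem guessVCF_py_spec : Claim_equal_guessVCF_py := by
  intro headers firstvar _hdom hpre
  unfold Spec_guessVCF_py guessVCF_py guessVCF_py_alt
  simp only []
  set lh := headers.map PySem.Str.lower with hlh
  set ko := firstvar.map (fun x => (PySem.Str.count x ":" : Int)) with hko
  set n : Int := (headers.length : Int) with hn
  by_cases hany : (PySem.List.slice lh (some 2) none).any (fun h => PySem.Str.isIn "format" h) = true
  · -- some header from column 2 on contains 'format': Pre_ gives the length bound
    rw [if_neg (not_not_intro hany)]
    have hdrop : PySem.List.slice lh (some 2) none = lh.drop 2 := by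
      rw [PySem.List.slice_from _ (by norm_num)]
      rfl
    have hlen3 : 3 ≤ headers.length := by
      have h := hany
      rw [hdrop, List.any_eq_true] at h
      rcases h with ⟨x, hx, -⟩
      have h1 := List.length_pos_of_mem hx
      have h2 : (lh.drop 2).length = lh.length - 2 := List.length_drop ..
      have h3 : lh.length = headers.length := by rw [hlh]; simp
      omega
    have hlen : (headers.length : Int) ≤ (firstvar.length : Int) := by
      rcases hpre with h | h
      · exact_mod_cast h
      · exfalso
        rw [List.any_eq_true] at hany
        rcases hany with ⟨x, hx, hfmt⟩
        rw [hdrop, hlh, ← List.map_drop] at hx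
        rcases List.mem_map.mp hx with ⟨y, hy, rfl⟩
        rw [h y hy] at hfmt
        exact Bool.false_ne_true hfmt
    -- the fold builds exactly pvSuffList (n-2) 1
    have hsuff : (PySem.List.pyRange (n-1) 1 (-1)).foldl
        (fun suffs i =>
          (if PySem.List.pyGetD firstvar i "" = "./." then PySem.List.pyGetD suffs 0 0
           else max (PySem.List.pyGetD suffs 0 0) (PySem.List.pyGetD ko i 0)) :: suffs)
        [-1] = pvSuffList firstvar ko n (n - 2).toNat 1 := by
      have h0 : (1 : Int) + ((n - 2).toNat : Int) = n - 1 := by omega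
      have h1 : (n - 1 - (1 + ((n - 2).toNat : Int))).toNat = 0 := by omega
      have hsf := suff_fold firstvar ko n (n - 2).toNat 1 le_rfl (by omega)
      rw [h0, show (n - 1 - (n - 1)).toNat = 0 from by omega,
          show n - 1 - 1 = n - 2 from by ring] at hsf
      simp only [pvSuffList] at hsf
      exact hsf
    rw [hsuff]
    have hL := loop_eq_filter headers firstvar hlen (headers.length - 1) (by omega)
    rw [show (((headers.length - 1 : Nat)) : Int) = n - 1 from by omega,
        show n - 1 + 1 = n from by ring] at hL
    exact hL
  · -- no 'format' header from column 2 on: both sides return (False, '', '')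
    rw [if_pos (by simpa using hany)]
    apply guessVCF_pyLoop_no_format
    intro i hi
    rw [PySem.List.mem_pyRange_neg_one] at hi
    have hlenlh : (lh.length : Int) = (headers.length : Int) := by rw [hlh]; simp
    have hmem : PySem.List.pyGetD lh i "" ∈ lh.drop 2 := by
      apply pyGetD_mem_drop_two lh i (by omega) (by omega)
    rw [Bool.not_eq_true, List.any_eq_false] at hany
    have hx : PySem.List.pyGetD lh i "" ∈ PySem.List.slice lh (some 2) none := by
      rw [PySem.List.slice_from _ (by norm_num)]
      exact hmem
    simpa using hany _ hx
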